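-- pv_equiv track=rewrite | github.com/pedroeuzebio/applied-science-feature-alt | classificacaoHierarquica.py | datasetJovemMaduraHierarquico
-- ===== SOURCE A (Python) =====
-- import copy
--
-- def datasetJovemMaduraHierarquico(y):
--     # transforma o dataset para duas classificacoes:
--     # 10 - maduras (3 e 5)
--     # 11 - jovens (1, 2 e 6)
--     y_na = copy.deepcopy(y)
--     for x in range(0, len(y_na)):
--         if (y_na[x]==3 or y_na[x]==5):
--             y_na[x] = 10
--         else:
--             if (y_na[x]==1 or y_na[x]==2 or y_na[x]==6):
--                 y_na[x] = 11
--     return y_na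
-- ===== SOURCE B (Python) =====
-- _RULES = ((3, 10), (5, 10), (1, 11), (2, 11), (6, 11))
--
-- def datasetJovemMaduraHierarquico(y):
--     # staged passes: apply each relabel rule to the whole list in turn;
--     # correct because 10/11 never appear as rule keys
--     out = list(y)
--     for old, new in _RULES:
--         out = [new if v == old else v for v in out]
--     return out
-- ===== Notes on version B (the rewrite author's own statement) =====
-- stated objective: alternative
-- what changed: Replaces the single indexed pass with an if/elif branch chain mutating a deepcopy by a rule-driven staged rewrite: a loop over the five (old,new) relabel rules, each applied as its own whole-list substitution pass.
import Mathlib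
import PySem

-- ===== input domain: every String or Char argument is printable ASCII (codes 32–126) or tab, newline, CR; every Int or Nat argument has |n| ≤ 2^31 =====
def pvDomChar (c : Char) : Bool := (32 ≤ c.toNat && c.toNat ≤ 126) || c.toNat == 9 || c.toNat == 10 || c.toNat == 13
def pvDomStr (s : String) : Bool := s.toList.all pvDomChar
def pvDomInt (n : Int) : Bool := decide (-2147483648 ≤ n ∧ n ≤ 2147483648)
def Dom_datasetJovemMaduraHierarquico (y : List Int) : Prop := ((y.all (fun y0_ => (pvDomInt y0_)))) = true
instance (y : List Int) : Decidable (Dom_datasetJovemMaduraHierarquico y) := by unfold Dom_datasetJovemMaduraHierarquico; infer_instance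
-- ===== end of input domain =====

-- B replaces A's single indexed pass with branch chains by a staged rewrite: one substitution pass per relabel rule (alternative decomposition, same output).

-- ===== PORT A =====
def datasetJovemMaduraHierarquico (y : List Int) : List Int :=
  let y_na := y
  (PySem.List.pyRange 0 (y_na.length : Int) 1).foldl (fun y_na x =>
    if PySem.List.pyGetD y_na x 0 == 3 || PySem.List.pyGetD y_na x 0 == 5 then
      PySem.List.pySetD y_na x 10
    else
      if PySem.List.pyGetD y_na x 0 == 1 || PySem.List.pyGetD y_na x 0 == 2 || PySem.List.pyGetD y_na x 0 == 6 then
        PySem.List.pySetD y_na x 11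
      else y_na) y_na

-- ===== PORT B =====
def pvRules : List (Int × Int) := [(3, 10), (5, 10), (1, 11), (2, 11), (6, 11)]

def datasetJovemMaduraHierarquico_alt (y : List Int) : List Int :=
  pvRules.foldl (fun out r => out.map (fun v => if v == r.1 then r.2 else v)) y

-- ===== PRECONDITION & SPEC =====
def Spec_datasetJovemMaduraHierarquico (y : List Int) (out : List Int) : Prop := out = datasetJovemMaduraHierarquico_alt y
instance (y : List Int) (out : List Int) : Decidable (Spec_datasetJovemMaduraHierarquico y out) := by unfold Spec_datasetJovemMaduraHierarquico; infer_instance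

-- ===== CLAIM (what is proved, stated in full; the proofs are below) =====
def Claim_equal_datasetJovemMaduraHierarquico : Prop := ∀ (y : List Int), Dom_datasetJovemMaduraHierarquico y → Spec_datasetJovemMaduraHierarquico y (datasetJovemMaduraHierarquico y)

-- ===== LEMMAS AND PROOFS =====

-- the per-element relabeling A's branch chain computes
def pvG (v : Int) : Int :=
  if v == 3 || v == 5 then 10
  else if v == 1 || v == 2 || v == 6 then 11 else v

lemma pv_set_append (pre : List Int) (v w : Int) (rest : List Int) :
    (pre ++ v :: rest).set pre.length w = pre ++ w :: rest := by
  induction pre with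
  | nil => rfl
  | cons a pre ih => simp [ih]

lemma hset_eq (pre : List Int) (v w : Int) (rest : List Int) :
    PySem.List.pySetD (pre ++ v :: rest) (pre.length : Int) w = pre ++ w :: rest := by
  rw [PySem.List.pySetD_natCast, pv_set_append]

-- loop invariant for A: the fold over the remaining indices maps the suffix by pvG
lemma pv_fold_inv (suf pre : List Int) :
    (PySem.List.pyRange (pre.length : Int) ((pre.length + suf.length : Nat) : Int) 1).foldl
      (fun y_na x =>
        if PySem.List.pyGetD y_na x 0 == 3 || PySem.List.pyGetD y_na x 0 == 5 then
          PySem.List.pySetD y_na x 10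
        else
          if PySem.List.pyGetD y_na x 0 == 1 || PySem.List.pyGetD y_na x 0 == 2 || PySem.List.pyGetD y_na x 0 == 6 then
            PySem.List.pySetD y_na x 11
          else y_na) (pre ++ suf)
      = pre ++ suf.map pvG := by
  induction suf generalizing pre with
  | nil =>
    rw [PySem.List.pyRange_one_eq_nil (by simp)]
    simp
  | cons v rest ih =>
    have hlt : (pre.length : Int) < ((pre.length + (v :: rest).length : Nat) : Int) := by
      simp only [List.length_cons]; push_cast; omega
    rw [PySem.List.pyRange_one_cons hlt, List.foldl_cons]
    have hget : PySem.List.pyGetD (pre ++ v :: rest) (pre.length : Int) 0 = v := by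
      rw [PySem.List.pyGetD_natCast]
      simp [List.getD]
    rw [hget]
    have hupper : ((pre.length + (v :: rest).length : Nat) : Int)
        = (((pre ++ [v]).length + rest.length : Nat) : Int) := by
      simp only [List.length_cons, List.length_append, List.length_nil]; push_cast; omega
    have hlower : ((pre.length : Int) + 1) = (((pre ++ [v]).length : Nat) : Int) := by
      simp only [List.length_append, List.length_cons, List.length_nil]; push_cast; omega
    by_cases h35 : (v == 3 || v == 5) = true
    · rw [if_pos h35]
      have hv : pvG v = 10 := by unfold pvG; simp [h35]
      have hih := ih (pre ++ [(10 : Int)])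
      simp only [List.append_assoc, List.singleton_append, List.length_append,
        List.length_cons, List.length_nil] at hih
      rw [hset_eq (pre := pre) (v := v) (rest := rest) (w := 10), hupper, hlower]
      simp only [List.length_append, List.length_cons, List.length_nil]
      rw [hih]
      simp [hv]
    · rw [if_neg h35]
      by_cases h126 : (v == 1 || v == 2 || v == 6) = true
      · rw [if_pos h126]
        have hv : pvG v = 11 := by unfold pvG; simp [h35, h126]
        have hih := ih (pre ++ [(11 : Int)])
        simp only [List.append_assoc, List.singleton_append, List.length_append,
          List.length_cons, List.length_nil] at hih
        rw [hset_eq (pre := pre) (v := v) (rest := rest) (w := 11), hupper, hlower]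
        simp only [List.length_append, List.length_cons, List.length_nil]
        rw [hih]
        simp [hv]
      · rw [if_neg h126]
        have hv : pvG v = v := by unfold pvG; simp [h35, h126]
        have hih := ih (pre ++ [v])
        simp only [List.append_assoc, List.singleton_append, List.length_append,
          List.length_cons, List.length_nil] at hih
        rw [hupper, hlower]
        simp only [List.length_append, List.length_cons, List.length_nil]
        rw [hih]
        simp [hv]

-- B's five staged substitution passes compose to the single map by pvG
lemma pv_alt_eq_map (y : List Int) :
    datasetJovemMaduraHierarquico_alt y = y.map pvG := by
  unfold datasetJovemMaduraHierarquico_alt pvRules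
  simp only [List.foldl_cons, List.foldl_nil, List.map_map]
  apply List.map_congr_left
  intro v _
  simp only [Function.comp, pvG, beq_iff_eq, Bool.or_eq_true]
  split_ifs <;> simp_all

-- ===== VERDICT (by name: the statement is the Claim_ definition above) =====
theorem datasetJovemMaduraHierarquico_spec : Claim_equal_datasetJovemMaduraHierarquico := by
  intro y _
  unfold Spec_datasetJovemMaduraHierarquico datasetJovemMaduraHierarquico
  rw [pv_alt_eq_map]
  have h := pv_fold_inv y []
  simpa using h
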